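-- pv_equiv track=rewrite | github.com/BonoGiorgio02/ZooCAM_Challenge | src/torchtmpl/main.py | _get_phase_for_epoch
-- ===== SOURCE A (Python) =====
-- def _get_phase_for_epoch(train_cfg, epoch_1based):
--     """Return phase for epoch."""
--     phase_items = []
--     for key, value in train_cfg.items():
--         if not str(key).startswith("phase") or not isinstance(value, dict):
--             continue
--         if "epochs" not in value:
--             continue
--         window = value["epochs"]
--         if not isinstance(window, (list, tuple)) or len(window) != 2:
--             raise ValueError(f"{key}.epochs must be [start, end]")
--         start, end = int(window[0]), int(window[1])
--         phase_items.append((start, end, key, value))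
--
--     phase_items.sort(key=lambda x: x[0])
--     for start, end, key, value in phase_items:
--         if start <= epoch_1based <= end:
--             return key, value
--
--     return None, {}
-- ===== SOURCE B (Python) =====
-- def _get_phase_for_epoch(train_cfg, epoch_1based):
--     """Return phase for epoch."""
--     best = None
--     for key, value in train_cfg.items():
--         if not str(key).startswith("phase") or not isinstance(value, dict):
--             continue
--         if "epochs" not in value:
--             continue
--         window = value["epochs"]
--         if not isinstance(window, (list, tuple)) or len(window) != 2:
--             raise ValueError(f"{key}.epochs must be [start, end]")
--         start, end = int(window[0]), int(window[1])
--         if start <= epoch_1based <= end and (best is None or start < best[0]):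
--             best = (start, key, value)
--     if best is None:
--         return None, {}
--     return best[1], best[2]
-- ===== Notes on version B (the rewrite author's own statement) =====
-- stated objective: simpler
-- what changed: B replaces A's collect-all/stable-sort/second-scan with a single pass that tracks the matching phase with the strictly smallest start (first one wins ties), still validating every phase entry; no list is built and no sort is performed.
import Mathlib
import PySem

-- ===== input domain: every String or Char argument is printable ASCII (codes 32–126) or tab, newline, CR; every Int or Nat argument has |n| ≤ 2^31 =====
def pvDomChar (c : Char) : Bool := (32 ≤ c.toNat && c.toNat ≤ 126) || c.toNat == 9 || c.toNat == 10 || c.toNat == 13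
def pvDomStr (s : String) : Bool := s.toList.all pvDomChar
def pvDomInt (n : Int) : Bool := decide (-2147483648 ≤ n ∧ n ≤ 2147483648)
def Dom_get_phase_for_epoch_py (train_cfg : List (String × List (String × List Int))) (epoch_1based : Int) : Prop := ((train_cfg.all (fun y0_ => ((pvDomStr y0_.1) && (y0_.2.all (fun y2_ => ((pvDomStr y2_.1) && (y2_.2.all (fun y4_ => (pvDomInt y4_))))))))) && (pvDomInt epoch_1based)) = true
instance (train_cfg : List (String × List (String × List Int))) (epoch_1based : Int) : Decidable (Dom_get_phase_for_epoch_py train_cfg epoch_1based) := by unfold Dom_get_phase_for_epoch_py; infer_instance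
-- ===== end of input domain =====

-- B replaces A's collect/stable-sort/rescan with one pass tracking the matching phase of
-- strictly smallest start (first wins ties), still validating every phase entry; same results.

-- dict lookup, first match: models both '"epochs" in value' and 'value["epochs"]'
def lookupEpochs (v : List (String × List Int)) : Option (List Int) :=
  (v.find? (fun p => p.1 == "epochs")).map (fun p => p.2)

-- ===== PORT A =====
-- the collection loop; 'none' = the ValueError path (excluded by Pre_)
def collectA : List (String × List (String × List Int)) →
    List (Int × Int × String × List (String × List Int)) →
    Option (List (Int × Int × String × List (String × List Int)))
  | [], acc => some acc
  | (k, v) :: rest, acc =>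
    if PySem.Str.startswith k "phase" then
      match lookupEpochs v with
      | some w =>
        match w with
        | [s, e] => collectA rest (acc ++ [(s, e, k, v)])
        | _ => none           -- raise ValueError
      | none => collectA rest acc
    else collectA rest acc

def get_phase_for_epoch_py (train_cfg : List (String × List (String × List Int))) (epoch_1based : Int) : Option String × (List (String × List Int)) :=
  match collectA train_cfg [] with
  | none => (none, [])        -- unreachable under Pre_ (Python raises)
  | some phase_items =>
    match (PySem.List.sorted phase_items (fun x => x.1) false).find?
        (fun x => decide (x.1 ≤ epoch_1based) && decide (epoch_1based ≤ x.2.1)) with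
    | some (_, _, key, value) => (some key, value)
    | none => (none, [])

-- ===== PORT B =====
-- single pass; state = best (start, key, value) so far; outer 'none' = ValueError path
def bestB (epoch_1based : Int) : List (String × List (String × List Int)) →
    Option (Int × String × List (String × List Int)) →
    Option (Option (Int × String × List (String × List Int)))
  | [], best => some best
  | (k, v) :: rest, best =>
    if PySem.Str.startswith k "phase" then
      match lookupEpochs v with
      | some [s, e] =>
        if decide (s ≤ epoch_1based) && decide (epoch_1based ≤ e) &&
            (match best with | none => true | some c => decide (s < c.1)) then
          bestB epoch_1based rest (some (s, k, v))
        else bestB epoch_1based rest best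
      | some _ => none        -- raise ValueError
      | none => bestB epoch_1based rest best
    else bestB epoch_1based rest best

def get_phase_for_epoch_py_alt (train_cfg : List (String × List (String × List Int))) (epoch_1based : Int) : Option String × (List (String × List Int)) :=
  match bestB epoch_1based train_cfg none with
  | none => (none, [])        -- unreachable under Pre_ (Python raises)
  | some none => (none, [])
  | some (some (_, key, value)) => (some key, value)

-- ===== PRECONDITION & SPEC =====
-- entry is fine unless it is a phase entry whose 'epochs' window has length ≠ 2
def okEntry (p : String × List (String × List Int)) : Bool :=
  !(PySem.Str.startswith p.1 "phase") || ((lookupEpochs p.2).elim true (fun w => w.length == 2))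

-- Pre_ excludes exactly the inputs where Python A raises ValueError: a 'phase*' key whose
-- 'epochs' window does not have length 2 (B raises there too).
def Pre_get_phase_for_epoch_py (train_cfg : List (String × List (String × List Int))) (epoch_1based : Int) : Prop :=
  train_cfg.all okEntry = true
instance (train_cfg : List (String × List (String × List Int))) (epoch_1based : Int) : Decidable (Pre_get_phase_for_epoch_py train_cfg epoch_1based) := by unfold Pre_get_phase_for_epoch_py; infer_instance

def pvWitness_get_phase_for_epoch_py : (List (String × List (String × List Int))) × Int :=
  ([("phase1", [("epochs", [1, 3])]), ("phase2", [("epochs", [4, 9])])], 2)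

def Spec_get_phase_for_epoch_py (train_cfg : List (String × List (String × List Int))) (epoch_1based : Int) (out : Option String × (List (String × List Int))) : Prop := out = get_phase_for_epoch_py_alt train_cfg epoch_1based
instance (train_cfg : List (String × List (String × List Int))) (epoch_1based : Int) (out : Option String × (List (String × List Int))) : Decidable (Spec_get_phase_for_epoch_py train_cfg epoch_1based out) := by unfold Spec_get_phase_for_epoch_py; infer_instance

-- ===== CLAIM (what is proved, stated in full; the proofs are below) =====
def Claim_equal_get_phase_for_epoch_py : Prop := ∀ (train_cfg : List (String × List (String × List Int))) (epoch_1based : Int), Dom_get_phase_for_epoch_py train_cfg epoch_1based → Pre_get_phase_for_epoch_py train_cfg epoch_1based → Spec_get_phase_for_epoch_py train_cfg epoch_1based (get_phase_for_epoch_py train_cfg epoch_1based)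

-- ===== LEMMAS AND PROOFS =====

-- what one entry contributes to A's phase_items
def extractI (p : String × List (String × List Int)) : Option (Int × Int × String × List (String × List Int)) :=
  if PySem.Str.startswith p.1 "phase" then
    match lookupEpochs p.2 with
    | some [s, e] => some (s, e, p.1, p.2)
    | _ => none
  else none

-- B's update step, on full items
def pickA (E : Int) (b : Option (Int × Int × String × List (String × List Int)))
    (x : Int × Int × String × List (String × List Int)) : Option (Int × Int × String × List (String × List Int)) :=
  if decide (x.1 ≤ E) && decide (E ≤ x.2.1) &&
      (match b with | none => true | some c => decide (x.1 < c.1)) then some x else b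

def projI (x : Int × Int × String × List (String × List Int)) : Int × String × List (String × List Int) :=
  (x.1, x.2.2.1, x.2.2.2)

-- B's update step, on projected state
def pickB (E : Int) (b : Option (Int × String × List (String × List Int)))
    (x : Int × Int × String × List (String × List Int)) : Option (Int × String × List (String × List Int)) :=
  if decide (x.1 ≤ E) && decide (E ≤ x.2.1) &&
      (match b with | none => true | some c => decide (x.1 < c.1)) then some (projI x) else b

def hitE (E : Int) (x : Int × Int × String × List (String × List Int)) : Bool :=
  decide (x.1 ≤ E) && decide (E ≤ x.2.1)

theorem collectA_eq (l : List (String × List (String × List Int)))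
    (acc : List (Int × Int × String × List (String × List Int)))
    (h : l.all okEntry = true) :
    collectA l acc = some (acc ++ l.filterMap extractI) := by
  induction l generalizing acc with
  | nil => simp [collectA]
  | cons p rest ih =>
    obtain ⟨k, v⟩ := p
    simp only [List.all_cons, Bool.and_eq_true] at h
    obtain ⟨hk, hrest⟩ := h
    simp only [collectA, List.filterMap_cons]
    by_cases hs : PySem.Str.startswith k "phase" = true
    · have hs' : PySem.Chars.startswith k.toList ['p','h','a','s','e'] = true := by simpa using hs
      simp only [okEntry, hs, Bool.not_true, Bool.false_or] at hk
      cases hw : lookupEpochs v with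
      | none =>
        have hx : extractI (k, v) = none := by simp [extractI, hs', hw]
        simp [hs', hw, hx, ih _ hrest]
      | some w =>
        rw [hw] at hk
        simp only [Option.elim] at hk
        match w, hk with
        | [s, e], _ =>
          have hx : extractI (k, v) = some (s, e, k, v) := by simp [extractI, hs', hw]
          simp [hs', hw, hx, ih _ hrest, List.append_assoc]
    · have hs' : PySem.Chars.startswith k.toList ['p','h','a','s','e'] = false := by simpa using hs
      have hx : extractI (k, v) = none := by simp [extractI, hs']
      simp [hs', hx, ih _ hrest]

theorem bestB_eq (E : Int) (l : List (String × List (String × List Int)))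
    (b : Option (Int × String × List (String × List Int)))
    (h : l.all okEntry = true) :
    bestB E l b = some ((l.filterMap extractI).foldl (pickB E) b) := by
  induction l generalizing b with
  | nil => simp [bestB]
  | cons p rest ih =>
    obtain ⟨k, v⟩ := p
    simp only [List.all_cons, Bool.and_eq_true] at h
    obtain ⟨hk, hrest⟩ := h
    simp only [bestB, List.filterMap_cons]
    by_cases hs : PySem.Str.startswith k "phase" = true
    · have hs' : PySem.Chars.startswith k.toList ['p','h','a','s','e'] = true := by simpa using hs
      simp only [okEntry, hs, Bool.not_true, Bool.false_or] at hk
      cases hw : lookupEpochs v with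
      | none =>
        have hx : extractI (k, v) = none := by simp [extractI, hs', hw]
        simp [hs', hw, hx, ih _ hrest]
      | some w =>
        rw [hw] at hk
        simp only [Option.elim] at hk
        match w, hk with
        | [s, e], _ =>
          have hx : extractI (k, v) = some (s, e, k, v) := by simp [extractI, hs', hw]
          have hp : pickB E b (s, e, k, v) =
              if decide (s ≤ E) && decide (E ≤ e) &&
                (match b with | none => true | some c => decide (s < c.1)) then
                some (s, k, v) else b := by
            simp [pickB, projI]
          simp [hs', hw, hx, hp, ih _ hrest]
          split <;> split <;> rfl
    · have hs' : PySem.Chars.startswith k.toList ['p','h','a','s','e'] = false := by simpa using hs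
      have hx : extractI (k, v) = none := by simp [extractI, hs']
      simp [hs', hx, ih _ hrest]

theorem proj_foldl (E : Int) (items : List (Int × Int × String × List (String × List Int)))
    (b : Option (Int × Int × String × List (String × List Int))) :
    items.foldl (pickB E) (b.map projI) = (items.foldl (pickA E) b).map projI := by
  induction items generalizing b with
  | nil => rfl
  | cons x rest ih =>
    simp only [List.foldl_cons]
    have hstep : pickB E (b.map projI) x = (pickA E b x).map projI := by
      cases b <;> simp [pickB, pickA, projI] <;> split <;> simp_all [projI]
    rw [hstep, ih]

theorem pairwise_insertBy (x : Int × Int × String × List (String × List Int))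
    (acc : List (Int × Int × String × List (String × List Int)))
    (h : acc.Pairwise (fun a b => a.1 ≤ b.1)) :
    (PySem.List.insertBy (fun a b => decide (a.1 < b.1)) x acc).Pairwise (fun a b => a.1 ≤ b.1) := by
  induction acc with
  | nil => simp [PySem.List.insertBy]
  | cons y ys ih =>
    rw [List.pairwise_cons] at h
    obtain ⟨hy, hys⟩ := h
    simp only [PySem.List.insertBy]
    by_cases hb : (decide (x.1 < y.1)) = true
    · simp only [hb, if_pos, List.pairwise_cons]
      refine ⟨?_, hy, hys⟩
      intro z hz
      rcases List.mem_cons.mp hz with rfl | hz2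
      · exact le_of_lt (by simpa using hb)
      · exact le_trans (le_of_lt (by simpa using hb)) (hy z hz2)
    · simp only [hb, if_neg, Bool.not_eq_true, List.pairwise_cons]
      refine ⟨?_, ih hys⟩
      intro z hz
      rw [PySem.List.mem_insertBy] at hz
      rcases hz with rfl | hz2
      · simpa using hb
      · exact hy z hz2

theorem find?_insertBy (E : Int) (x : Int × Int × String × List (String × List Int))
    (acc : List (Int × Int × String × List (String × List Int)))
    (h : acc.Pairwise (fun a b => a.1 ≤ b.1)) :
    (PySem.List.insertBy (fun a b => decide (a.1 < b.1)) x acc).find? (hitE E)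
      = pickA E (acc.find? (hitE E)) x := by
  induction acc with
  | nil =>
    simp only [PySem.List.insertBy, List.find?, pickA, hitE]
    split <;> simp_all
  | cons y ys ih =>
    rw [List.pairwise_cons] at h
    obtain ⟨hy, hys⟩ := h
    simp only [PySem.List.insertBy]
    by_cases hb : (decide (x.1 < y.1)) = true
    · -- x goes in front
      simp only [hb, if_pos]
      by_cases hx : hitE E x = true
      · simp only [List.find?_cons_of_pos hx, pickA]
        cases hfind : (y :: ys).find? (hitE E) with
        | none =>
          simp only [hitE, Bool.and_eq_true, decide_eq_true_eq] at hx
          simp [pickA, hx]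
        | some c =>
          have hc : c ∈ y :: ys := List.mem_of_find?_eq_some hfind
          have hyc : y.1 ≤ c.1 := by
            rcases List.mem_cons.mp hc with rfl | hc2
            · exact le_refl _
            · exact hy c hc2
          have hxc : x.1 < c.1 := lt_of_lt_of_le (by simpa using hb) hyc
          simp only [hitE, Bool.and_eq_true, decide_eq_true_eq] at hx
          simp [pickA, hx, hxc]
      · rw [List.find?_cons_of_neg (by simpa using hx)]
        simp only [pickA]
        simp only [hitE] at hx
        simp [hx]
    · -- x goes after y
      simp only [hb, if_neg, Bool.not_eq_true]
      by_cases hyh : hitE E y = true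
      · rw [List.find?_cons_of_pos hyh, List.find?_cons_of_pos hyh]
        have hxy : ¬ (x.1 < y.1) := by simpa using hb
        simp only [pickA]
        have : (decide (x.1 < y.1)) = false := by simpa using hb
        simp [hitE, this]
      · rw [List.find?_cons_of_neg (by simpa using hyh),
           List.find?_cons_of_neg (by simpa using hyh)]
        exact ih hys

theorem find?_foldl_insertBy (E : Int)
    (items acc : List (Int × Int × String × List (String × List Int)))
    (h : acc.Pairwise (fun a b => a.1 ≤ b.1)) :
    ((items.foldl (fun a x => PySem.List.insertBy (fun a b => decide (a.1 < b.1)) x a) acc).find? (hitE E))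
      = items.foldl (pickA E) (acc.find? (hitE E)) := by
  induction items generalizing acc with
  | nil => rfl
  | cons x rest ih =>
    simp only [List.foldl_cons]
    rw [ih _ (pairwise_insertBy x acc h), find?_insertBy E x acc h]

-- ===== VERDICT (by name: the statement is the Claim_ definition above) =====
theorem get_phase_for_epoch_py_spec : Claim_equal_get_phase_for_epoch_py := by
  intro train_cfg E _ hpre
  unfold Spec_get_phase_for_epoch_py get_phase_for_epoch_py get_phase_for_epoch_py_alt
  rw [collectA_eq train_cfg [] hpre, bestB_eq E train_cfg none hpre]
  simp only [List.nil_append]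
  have hB : (train_cfg.filterMap extractI).foldl (pickB E) none
      = ((train_cfg.filterMap extractI).foldl (pickA E) none).map projI := by
    have := proj_foldl E (train_cfg.filterMap extractI) none
    simpa using this
  have hA : (PySem.List.sorted (train_cfg.filterMap extractI) (fun x => x.1) false).find? (hitE E)
      = (train_cfg.filterMap extractI).foldl (pickA E) none := by
    rw [PySem.List.sorted_eq_foldl_insertBy]
    have := find?_foldl_insertBy E (train_cfg.filterMap extractI) [] (by simp)
    simpa using this
  rw [hB]
  rw [show (fun (x : Int × Int × String × List (String × List Int)) =>
        decide (x.1 ≤ E) && decide (E ≤ x.2.1)) = hitE E from rfl]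
  rw [hA]
  cases (train_cfg.filterMap extractI).foldl (pickA E) none with
  | none => rfl
  | some m => rfl
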